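-- pv_equiv track=rewrite | github.com/Sir2B/Uni | Python/CodinGame/Training/classic puzzels - hard/CGX Formatter.py | ident
-- ===== SOURCE A (Python) =====
-- def ident(mystring):
--     ident_n = 0
--     result = ""
--     string_started = False
--     is_new_line = False
--     for char in mystring:
--         if char == "'":
--             string_started = not string_started
--         if string_started:
--             if is_new_line:
--                 result += ident_n * ' '
--                 is_new_line = False
--             result += char
--         else:
--             if char == '(':
--                 if not is_new_line:
--                     result += '\n'
--                 result += " "*ident_n + char + '\n'
--                 is_new_line = True
--                 ident_n += 4
--             elif char == ')':
--                 if not is_new_line: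
--                     result += '\n'
--                 ident_n -= 4
--                 is_new_line = False
--                 result += " "*ident_n + char
--             elif char == ';':
--                 result += char + '\n'
--                 is_new_line = True
--             else:
--                 if char != " " and char != "\t":
--                     if is_new_line:
--                         result += ident_n * ' '
--                         is_new_line = False
--                     result += char
--
--
--     return result
-- ===== SOURCE B (Python) =====
-- def ident(mystring):
--     # Pass 1: tokenize — whole string literals (both quotes kept), structural
--     # chars, plain chars; whitespace outside strings is dropped.
--     tokens = []
--     i = 0
--     n = len(mystring)
--     while i < n:
--         c = mystring[i]
--         if c == "'":
--             j = i + 1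
--             while j < n and mystring[j] != "'":
--                 j += 1
--             end = j + 1 if j < n else n
--             tokens.append(('s', mystring[i:end]))
--             i = end
--         elif c in "();":
--             tokens.append((c, c))
--             i += 1
--         elif c in " \t":
--             i += 1
--         else:
--             tokens.append(('c', c))
--             i += 1
--     # Pass 2: render the tokens, tracking indentation and line state.
--     pieces = []
--     ident_n = 0
--     is_new_line = False
--     for kind, text in tokens:
--         if kind == '(':
--             if not is_new_line:
--                 pieces.append('\n')
--             pieces.append(' ' * ident_n + '(' + '\n')
--             is_new_line = True
--             ident_n += 4
--         elif kind == ')':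
--             if not is_new_line:
--                 pieces.append('\n')
--             ident_n -= 4
--             is_new_line = False
--             pieces.append(' ' * ident_n + ')')
--         elif kind == ';':
--             pieces.append(';\n')
--             is_new_line = True
--         else:
--             if is_new_line:
--                 pieces.append(' ' * ident_n)
--                 is_new_line = False
--             pieces.append(text)
--     return ''.join(pieces)
-- ===== Notes on version B (the rewrite author's own statement) =====
-- stated objective: alternative
-- what changed: Replaces A's single interleaved character scan with in-string state by a two-pass tokenize-then-render decomposition: pass 1 builds a token list (whole quoted literals kept intact, structural punctuation tokens, plain characters, whitespace outside strings dropped), pass 2 renders the tokens into pieces tracking indentation and line state, joined once at the end.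
import Mathlib
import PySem

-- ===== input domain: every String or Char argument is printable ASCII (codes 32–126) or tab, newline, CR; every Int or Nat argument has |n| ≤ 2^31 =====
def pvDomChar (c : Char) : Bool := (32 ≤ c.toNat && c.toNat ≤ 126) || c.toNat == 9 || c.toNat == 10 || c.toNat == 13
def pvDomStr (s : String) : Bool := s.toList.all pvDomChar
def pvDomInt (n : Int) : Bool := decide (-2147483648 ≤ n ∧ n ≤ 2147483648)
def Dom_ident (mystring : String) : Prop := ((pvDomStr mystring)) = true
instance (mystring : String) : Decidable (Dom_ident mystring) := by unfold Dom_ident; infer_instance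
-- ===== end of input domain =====

-- B re-decomposes A's single interleaved scan into tokenize-then-render (same output; objective: alternative decomposition).

-- ===== PORT A =====
-- Python " " * n (empty for n ≤ 0)
def pyRep (n : Int) : List Char := List.replicate n.toNat ' '

structure StA where
  n : Int
  res : List Char
  ss : Bool
  inl : Bool
  deriving DecidableEq, Repr

-- one iteration of A's for-loop, branch for branch
def stepA (st : StA) (c : Char) : StA :=
  let ss := if c = '\'' then !st.ss else st.ss
  if ss then
    ⟨st.n, st.res ++ (if st.inl then pyRep st.n else []) ++ [c], ss, false⟩
  else if c = '(' then
    ⟨st.n + 4, st.res ++ (if st.inl then [] else ['\n']) ++ pyRep st.n ++ [c] ++ ['\n'], ss, true⟩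
  else if c = ')' then
    ⟨st.n - 4, st.res ++ (if st.inl then [] else ['\n']) ++ pyRep (st.n - 4) ++ [c], ss, false⟩
  else if c = ';' then
    ⟨st.n, st.res ++ [c, '\n'], ss, true⟩
  else if c = ' ' ∨ c = '\t' then
    ⟨st.n, st.res, ss, st.inl⟩
  else
    ⟨st.n, st.res ++ (if st.inl then pyRep st.n else []) ++ [c], ss, false⟩

def ident (mystring : String) : String :=
  String.ofList (mystring.toList.foldl stepA ⟨0, [], false, false⟩).res

-- ===== PORT B =====
inductive Tok where
  | str : List Char → Tok
  | lp | rp | semi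
  | ch : Char → Tok
  deriving DecidableEq, Repr

-- B's inner while loop: chars up to and including the closing quote, and the rest
def takeStr : List Char → List Char × List Char
  | [] => ([], [])
  | c :: rest =>
    if c = '\'' then ([c], rest)
    else let p := takeStr rest; (c :: p.1, p.2)

theorem takeStr_snd_le : ∀ cs : List Char, (takeStr cs).2.length ≤ cs.length := by
  intro cs
  induction cs with
  | nil => simp [takeStr]
  | cons c rest ih =>
    simp only [takeStr]
    split
    · simp
    · simpa using Nat.le_succ_of_le ih

-- B's pass 1
def tokenize : List Char → List Tok
  | [] => []
  | c :: rest =>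
    if c = '\'' then
      let p := takeStr rest
      Tok.str ('\'' :: p.1) :: tokenize p.2
    else if c = '(' then Tok.lp :: tokenize rest
    else if c = ')' then Tok.rp :: tokenize rest
    else if c = ';' then Tok.semi :: tokenize rest
    else if c = ' ' ∨ c = '\t' then tokenize rest
    else Tok.ch c :: tokenize rest
termination_by cs => cs.length
decreasing_by
  · exact Nat.lt_succ_of_le (takeStr_snd_le rest)
  all_goals exact Nat.lt_succ_self _

-- B's pass 2: state = (ident_n, pieces, is_new_line)
def stepB (st : Int × List (List Char) × Bool) (t : Tok) : Int × List (List Char) × Bool :=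
  match st, t with
  | (n, ps, inl), Tok.lp => (n + 4, ps ++ (if inl then [] else [['\n']]) ++ [pyRep n ++ ['('] ++ ['\n']], true)
  | (n, ps, inl), Tok.rp => (n - 4, ps ++ (if inl then [] else [['\n']]) ++ [pyRep (n - 4) ++ [')']], false)
  | (n, ps, _), Tok.semi => (n, ps ++ [[';', '\n']], true)
  | (n, ps, inl), Tok.str s => (n, ps ++ (if inl then [pyRep n] else []) ++ [s], false)
  | (n, ps, inl), Tok.ch c => (n, ps ++ (if inl then [pyRep n] else []) ++ [[c]], false)

def ident_alt (mystring : String) : String :=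
  String.ofList ((tokenize mystring.toList).foldl stepB (0, [], false)).2.1.flatten

-- ===== PRECONDITION & SPEC =====
def Spec_ident (mystring : String) (out : String) : Prop := out = ident_alt mystring
instance (mystring : String) (out : String) : Decidable (Spec_ident mystring out) := by unfold Spec_ident; infer_instance

-- ===== CLAIM (what is proved, stated in full; the proofs are below) =====
def Claim_equal_ident : Prop := ∀ (mystring : String), Dom_ident mystring → Spec_ident mystring (ident mystring)

-- ===== LEMMAS AND PROOFS =====

theorem takeStr_spec : ∀ cs : List Char,
    cs = (takeStr cs).1 ++ (takeStr cs).2 ∧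
      ((∃ pre, (takeStr cs).1 = pre ++ ['\''] ∧ '\'' ∉ pre) ∨
        ('\'' ∉ (takeStr cs).1 ∧ (takeStr cs).2 = [])) := by
  intro cs
  induction cs with
  | nil => exact ⟨rfl, Or.inr ⟨by simp [takeStr], rfl⟩⟩
  | cons c rest ih =>
    by_cases h : c = '\''
    · subst h
      refine ⟨by simp [takeStr], Or.inl ⟨[], by simp [takeStr], by simp⟩⟩
    · obtain ⟨h1, h2⟩ := ih
      refine ⟨?_, ?_⟩
      · simp only [takeStr, if_neg h]
        simpa using congrArg (c :: ·) h1
      rcases h2 with ⟨pre, hp, hnp⟩ | ⟨hq, hr⟩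
      · refine Or.inl ⟨c :: pre, ?_, ?_⟩
        · simp only [takeStr, if_neg h]
          simpa using congrArg (c :: ·) hp
        · simp only [List.mem_cons, not_or]
          exact ⟨fun e => h e.symm, hnp⟩
      · refine Or.inr ⟨?_, ?_⟩
        · simp only [takeStr, if_neg h, List.mem_cons, not_or]
          exact ⟨fun e => h e.symm, hq⟩
        · simpa [takeStr, if_neg h] using hr

theorem run_noquote : ∀ (lit : List Char) (n : Int) (r : List Char), '\'' ∉ lit →
    lit.foldl stepA ⟨n, r, true, false⟩ = ⟨n, r ++ lit, true, false⟩ := by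
  intro lit
  induction lit with
  | nil => simp
  | cons c rest ih =>
    intro n r h
    simp only [List.mem_cons, not_or] at h
    obtain ⟨h1, hr⟩ := h
    have hc : c ≠ '\'' := fun e => h1 e.symm
    simp only [List.foldl_cons]
    rw [show stepA ⟨n, r, true, false⟩ c = ⟨n, r ++ [c], true, false⟩ by
      simp [stepA, hc]]
    simpa using ih n (r ++ [c]) hr

theorem run_term : ∀ (pre : List Char) (n : Int) (r : List Char), '\'' ∉ pre →
    (pre ++ ['\'']).foldl stepA ⟨n, r, true, false⟩ = ⟨n, r ++ pre ++ ['\''], false, false⟩ := by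
  intro pre n r h
  rw [List.foldl_append, run_noquote pre n r h]
  simp [stepA]

theorem stepB_shift : ∀ (toks : List Tok) (n : Int) (ps : List (List Char)) (b : Bool),
    toks.foldl stepB (n, ps, b) =
      ((toks.foldl stepB (n, [], b)).1,
        ps ++ (toks.foldl stepB (n, [], b)).2.1,
        (toks.foldl stepB (n, [], b)).2.2) := by
  intro toks
  induction toks with
  | nil => simp
  | cons t rest ih =>
    intro n ps b
    cases t with
    | str s =>
      simp only [List.foldl_cons, stepB, List.nil_append, List.append_assoc]
      rw [ih n (ps ++ ((if b then [pyRep n] else []) ++ [s])) false,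
        ih n ((if b then [pyRep n] else []) ++ [s]) false]
      simp
    | lp =>
      simp only [List.foldl_cons, stepB, List.nil_append, List.append_assoc]
      rw [ih (n + 4) (ps ++ ((if b then [] else [['\n']]) ++ [pyRep n ++ (['('] ++ ['\n'])])) true,
        ih (n + 4) ((if b then [] else [['\n']]) ++ [pyRep n ++ (['('] ++ ['\n'])]) true]
      simp
    | rp =>
      simp only [List.foldl_cons, stepB, List.nil_append, List.append_assoc]
      rw [ih (n - 4) (ps ++ ((if b then [] else [['\n']]) ++ [pyRep (n - 4) ++ [')']])) false,
        ih (n - 4) ((if b then [] else [['\n']]) ++ [pyRep (n - 4) ++ [')']]) false]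
      simp
    | semi =>
      simp only [List.foldl_cons, stepB, List.nil_append, List.append_assoc]
      rw [ih n (ps ++ [[';', '\n']]) true, ih n [[';', '\n']] true]
      simp
    | ch c =>
      simp only [List.foldl_cons, stepB, List.nil_append, List.append_assoc]
      rw [ih n (ps ++ ((if b then [pyRep n] else []) ++ [[c]])) false,
        ih n ((if b then [pyRep n] else []) ++ [[c]]) false]
      simp

theorem stepB_shift' : ∀ (toks : List Tok) (n : Int) (p : List Char) (ps : List (List Char)) (b : Bool),
    toks.foldl stepB (n, p :: ps, b) =
      ((toks.foldl stepB (n, [], b)).1,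
        p :: ps ++ (toks.foldl stepB (n, [], b)).2.1,
        (toks.foldl stepB (n, [], b)).2.2) := by
  intro toks n p ps b
  simpa using stepB_shift toks n (p :: ps) b

theorem main_lemma : ∀ (k : Nat) (cs : List Char), cs.length ≤ k →
    ∀ (n : Int) (r : List Char) (b : Bool),
    ∃ ss, cs.foldl stepA ⟨n, r, false, b⟩ =
      ⟨((tokenize cs).foldl stepB (n, [], b)).1,
        r ++ ((tokenize cs).foldl stepB (n, [], b)).2.1.flatten,
        ss,
        ((tokenize cs).foldl stepB (n, [], b)).2.2⟩ := by
  intro k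
  induction k with
  | zero =>
    intro cs h n r b
    have : cs = [] := List.length_eq_zero_iff.mp (Nat.le_zero.mp h)
    subst this
    exact ⟨false, by simp [tokenize]⟩
  | succ k ih =>
    intro cs h n r b
    match cs with
    | [] => exact ⟨false, by simp [tokenize]⟩
    | c :: rest =>
      have hrest : rest.length ≤ k := Nat.lt_succ_iff.mp (by simpa using h)
      by_cases hq : c = '\''
      · subst hq
        obtain ⟨hsplit, hcase⟩ := takeStr_spec rest
        have hrest' : (takeStr rest).2.length ≤ k :=
          le_trans (takeStr_snd_le rest) hrest
        -- A's first step on the opening quote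
        have hstep : stepA ⟨n, r, false, b⟩ '\'' =
            ⟨n, r ++ (if b then pyRep n else []) ++ ['\''], true, false⟩ := by
          simp [stepA]
        rw [show tokenize ('\'' :: rest) = Tok.str ('\'' :: (takeStr rest).1) :: tokenize (takeStr rest).2 from by
          simp [tokenize]]
        simp only [List.foldl_cons, hstep]
        rcases hcase with ⟨pre, hp, hnp⟩ | ⟨hnq, hr2⟩
        · -- terminated literal
          obtain ⟨ss, hih⟩ := ih (takeStr rest).2 hrest' n
            (r ++ (if b then pyRep n else []) ++ ['\''] ++ pre ++ ['\'']) false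
          refine ⟨ss, ?_⟩
          conv_lhs => rw [hsplit]
          rw [List.foldl_append, hp, run_term pre n _ hnp, hih]
          cases b <;> simp [stepB, stepB_shift']
        · -- unterminated literal: the rest of the input is the literal body
          rw [hr2]
          refine ⟨true, ?_⟩
          conv_lhs => rw [hsplit, hr2]
          rw [List.append_nil, run_noquote (takeStr rest).1 n _ hnq]
          cases b <;> simp [tokenize, stepB]
      · by_cases h1 : c = '('
        · subst h1
          rw [show tokenize ('(' :: rest) = Tok.lp :: tokenize rest from by simp [tokenize]]
          simp only [List.foldl_cons]
          rw [show stepA ⟨n, r, false, b⟩ '(' =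
              ⟨n + 4, r ++ (if b then [] else ['\n']) ++ pyRep n ++ ['('] ++ ['\n'], false, true⟩ from by
            simp [stepA]]
          obtain ⟨ss, hih⟩ := ih rest hrest (n + 4)
            (r ++ (if b then [] else ['\n']) ++ pyRep n ++ ['('] ++ ['\n']) true
          refine ⟨ss, ?_⟩
          rw [hih]
          cases b <;> simp [stepB, stepB_shift']
        · by_cases h2 : c = ')'
          · subst h2
            rw [show tokenize (')' :: rest) = Tok.rp :: tokenize rest from by simp [tokenize]]
            simp only [List.foldl_cons]
            rw [show stepA ⟨n, r, false, b⟩ ')' =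
                ⟨n - 4, r ++ (if b then [] else ['\n']) ++ pyRep (n - 4) ++ [')'], false, false⟩ from by
              simp [stepA]]
            obtain ⟨ss, hih⟩ := ih rest hrest (n - 4)
              (r ++ (if b then [] else ['\n']) ++ pyRep (n - 4) ++ [')']) false
            refine ⟨ss, ?_⟩
            rw [hih]
            cases b <;> simp [stepB, stepB_shift']
          · by_cases h3 : c = ';'
            · subst h3
              rw [show tokenize (';' :: rest) = Tok.semi :: tokenize rest from by simp [tokenize]]
              simp only [List.foldl_cons]
              rw [show stepA ⟨n, r, false, b⟩ ';' = ⟨n, r ++ [';', '\n'], false, true⟩ from by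
                simp [stepA]]
              obtain ⟨ss, hih⟩ := ih rest hrest n (r ++ [';', '\n']) true
              refine ⟨ss, ?_⟩
              rw [hih]
              simp [stepB, stepB_shift']
            · by_cases h4 : c = ' ' ∨ c = '\t'
              · rw [show tokenize (c :: rest) = tokenize rest from by
                  simp [tokenize, hq, h1, h2, h3, h4]]
                simp only [List.foldl_cons]
                rw [show stepA ⟨n, r, false, b⟩ c = ⟨n, r, false, b⟩ from by
                  rcases h4 with h4 | h4 <;> subst h4 <;> simp [stepA]]
                exact ih rest hrest n r b
              · rw [show tokenize (c :: rest) = Tok.ch c :: tokenize rest from by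
                  simp [tokenize, hq, h1, h2, h3, h4]]
                simp only [List.foldl_cons]
                rw [show stepA ⟨n, r, false, b⟩ c =
                    ⟨n, r ++ (if b then pyRep n else []) ++ [c], false, false⟩ from by
                  simp [stepA, hq, h1, h2, h3, h4]]
                obtain ⟨ss, hih⟩ := ih rest hrest n (r ++ (if b then pyRep n else []) ++ [c]) false
                refine ⟨ss, ?_⟩
                rw [hih]
                cases b <;> simp [stepB, stepB_shift']

-- ===== VERDICT (by name: the statement is the Claim_ definition above) =====
theorem ident_spec : Claim_equal_ident := by
  intro mystring _
  unfold Spec_ident ident ident_alt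
  obtain ⟨ss, h⟩ := main_lemma mystring.toList.length mystring.toList le_rfl 0 [] false
  rw [h]
  simp
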